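-- pv_equiv track=rewrite | github.com/pentafive/clublog-ha-bridge | tests/test_coordinator.py | compute_dxcc_stats
-- ===== SOURCE A (Python) =====
-- def compute_dxcc_stats(matrix: dict) -> tuple:
--     """Compute worked/confirmed/verified counts from DXCC matrix.
--
--     Extracted from coordinator._fetch_matrix for testability.
--     Status values: 1=confirmed, 2=worked (not confirmed), 3=verified (LoTW).
--     """
--     worked = set()
--     confirmed = set()
--     verified = set()
--     for dxcc_id, bands in matrix.items():
--         for _band, status in bands.items():
--             worked.add(dxcc_id)
--             if status in (1, 3):
--                 confirmed.add(dxcc_id)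
--             if status == 3:
--                 verified.add(dxcc_id)
--     return len(worked), len(confirmed), len(verified)
-- ===== SOURCE B (Python) =====
-- def compute_dxcc_stats(matrix: dict) -> tuple:
--     """Compute worked/confirmed/verified counts from DXCC matrix.
--
--     Single pass with integer counters: each dxcc with a non-empty bands
--     dict counts once as worked; any()-reductions over its statuses decide
--     the confirmed/verified increments (no sets, no per-band dedup).
--     """
--     worked = confirmed = verified = 0
--     for bands in matrix.values():
--         if not bands:
--             continue
--         worked += 1
--         statuses = list(bands.values())
--         if any(s in (1, 3) for s in statuses):
--             confirmed += 1
--         if 3 in statuses: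
--             verified += 1
--     return worked, confirmed, verified
-- ===== Notes on version B (the rewrite author's own statement) =====
-- stated objective: simpler
-- what changed: Replaced the three dedup sets filled per band by one pass over matrix.values() with three integer counters: a non-empty bands dict contributes 1 to worked and any()-reductions over its statuses decide the confirmed/verified increments.
import Mathlib
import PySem

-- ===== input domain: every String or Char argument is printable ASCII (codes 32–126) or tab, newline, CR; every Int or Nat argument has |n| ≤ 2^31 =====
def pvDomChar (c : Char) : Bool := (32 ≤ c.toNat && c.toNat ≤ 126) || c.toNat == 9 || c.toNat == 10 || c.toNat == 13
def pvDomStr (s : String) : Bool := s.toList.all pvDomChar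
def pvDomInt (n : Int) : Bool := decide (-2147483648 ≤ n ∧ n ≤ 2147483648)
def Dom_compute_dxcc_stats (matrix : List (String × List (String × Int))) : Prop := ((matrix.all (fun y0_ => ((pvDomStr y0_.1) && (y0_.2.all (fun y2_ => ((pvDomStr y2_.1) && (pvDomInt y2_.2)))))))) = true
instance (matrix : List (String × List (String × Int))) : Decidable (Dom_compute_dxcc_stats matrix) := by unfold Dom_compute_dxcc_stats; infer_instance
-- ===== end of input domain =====

-- B replaces A's three per-band dedup sets by a single pass with three integer counters
-- (one increment per non-empty dxcc, any()-reductions over its statuses); same cost, simpler.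

-- ===== PORT A =====
-- the body of A's nested 'for' loops: inner fold over bands, adding dxcc_id to the three sets
def pvAStep (acc : PySem.Set String × PySem.Set String × PySem.Set String)
    (p : String × List (String × Int)) :
    PySem.Set String × PySem.Set String × PySem.Set String :=
  p.2.foldl (fun acc b =>
    let w := PySem.Set.add acc.1 p.1
    let c := if b.2 == 1 || b.2 == 3 then PySem.Set.add acc.2.1 p.1 else acc.2.1
    let v := if b.2 == 3 then PySem.Set.add acc.2.2 p.1 else acc.2.2
    (w, c, v)) acc

def compute_dxcc_stats (matrix : List (String × List (String × Int))) : Int × Int × Int :=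
  let t := matrix.foldl pvAStep (PySem.Set.empty, PySem.Set.empty, PySem.Set.empty)
  ((t.1.length : Int), (t.2.1.length : Int), (t.2.2.length : Int))

-- ===== PORT B =====
-- B's single loop body: skip empty bands, else bump worked and the two any()-decided counters
def pvBStep (acc : Int × Int × Int) (p : String × List (String × Int)) : Int × Int × Int :=
  let bands := p.2
  if bands.isEmpty then acc
  else
    let statuses := bands.map Prod.snd
    let c := if statuses.any (fun s => s == 1 || s == 3) then acc.2.1 + 1 else acc.2.1
    let v := if statuses.contains 3 then acc.2.2 + 1 else acc.2.2
    (acc.1 + 1, c, v)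

def compute_dxcc_stats_alt (matrix : List (String × List (String × Int))) : Int × Int × Int :=
  matrix.foldl pvBStep (0, 0, 0)

-- ===== PRECONDITION & SPEC =====
-- Pre_ excludes association lists with duplicate outer (dxcc) keys: those do not represent
-- any Python dict (A's parameter type), so A never receives them.
def Pre_compute_dxcc_stats (matrix : List (String × List (String × Int))) : Prop :=
  (matrix.map Prod.fst).Nodup
instance (matrix : List (String × List (String × Int))) : Decidable (Pre_compute_dxcc_stats matrix) := by unfold Pre_compute_dxcc_stats; infer_instance

def pvWitness_compute_dxcc_stats : (List (String × List (String × Int))) :=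
  [("291", [("20m", 2), ("40m", 1)]), ("1", [])]

def Spec_compute_dxcc_stats (matrix : List (String × List (String × Int))) (out : Int × Int × Int) : Prop := out = compute_dxcc_stats_alt matrix
instance (matrix : List (String × List (String × Int))) (out : Int × Int × Int) : Decidable (Spec_compute_dxcc_stats matrix out) := by unfold Spec_compute_dxcc_stats; infer_instance

-- ===== CLAIM (what is proved, stated in full; the proofs are below) =====
def Claim_equal_compute_dxcc_stats : Prop := ∀ (matrix : List (String × List (String × Int))), Dom_compute_dxcc_stats matrix → Pre_compute_dxcc_stats matrix → Spec_compute_dxcc_stats matrix (compute_dxcc_stats matrix)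

-- ===== LEMMAS AND PROOFS =====

-- characterisation of A's inner loop over one dxcc's bands
theorem pvAStep_eq (d : String) (bands : List (String × Int))
    (w c v : PySem.Set String) :
    pvAStep (w, c, v) (d, bands) =
      ((if bands.isEmpty then w else PySem.Set.add w d),
       (if bands.any (fun b => b.2 == 1 || b.2 == 3) then PySem.Set.add c d else c),
       (if bands.any (fun b => b.2 == 3) then PySem.Set.add v d else v)) := by
  induction bands generalizing w c v with
  | nil => simp [pvAStep]
  | cons b rest ih =>
    have h : pvAStep (w, c, v) (d, b :: rest) =
        pvAStep ((PySem.Set.add w d),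
          (if b.2 == 1 || b.2 == 3 then PySem.Set.add c d else c),
          (if b.2 == 3 then PySem.Set.add v d else v)) (d, rest) := rfl
    have e1 : (if rest.isEmpty then PySem.Set.add w d
          else PySem.Set.add (PySem.Set.add w d) d)
        = (if (b :: rest).isEmpty then w else PySem.Set.add w d) := by
      cases rest <;> simp
    have e2 : (if rest.any (fun b => b.2 == 1 || b.2 == 3)
            then PySem.Set.add (if b.2 == 1 || b.2 == 3 then PySem.Set.add c d else c) d
            else (if b.2 == 1 || b.2 == 3 then PySem.Set.add c d else c))
        = (if (b :: rest).any (fun b => b.2 == 1 || b.2 == 3) then PySem.Set.add c d else c) := by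
      by_cases h1 : (b.2 == 1 || b.2 == 3) = true <;>
      by_cases h2 : (rest.any (fun b => b.2 == 1 || b.2 == 3)) = true <;>
        simp [List.any_cons, h1, h2]
    have e3 : (if rest.any (fun b => b.2 == 3)
            then PySem.Set.add (if b.2 == 3 then PySem.Set.add v d else v) d
            else (if b.2 == 3 then PySem.Set.add v d else v))
        = (if (b :: rest).any (fun b => b.2 == 3) then PySem.Set.add v d else v) := by
      by_cases h1 : (b.2 == 3) = true <;>
      by_cases h2 : (rest.any (fun b => b.2 == 3)) = true <;>
        simp [List.any_cons, h1, h2]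
    rw [h, ih]
    simp only [Prod.mk.injEq]
    exact ⟨e1, e2, e3⟩

theorem pv_len_add {s : PySem.Set String} {x : String} (hx : x ∉ s) :
    (PySem.Set.add s x).length = s.length + 1 := by
  simp [PySem.Set.add, PySem.Set.contains, hx]

theorem pv_mem_contains3 (bands : List (String × Int)) :
    (bands.map Prod.snd).contains 3 = bands.any (fun b => b.2 == 3) := by
  induction bands with
  | nil => rfl
  | cons b rest ih =>
    have hbc : ∀ (x : Int), (3 == x) = (x == 3) := fun x => by
      by_cases h : x = 3 <;> simp [h, eq_comm]
    simp only [List.map_cons, List.contains_cons, List.any_cons, ih]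
    rw [hbc]

-- main invariant: A's set fold and B's counter fold agree, provided the remaining keys
-- are fresh for all three sets
theorem pv_main (m : List (String × List (String × Int)))
    (w c v : PySem.Set String)
    (hnd : (m.map Prod.fst).Nodup)
    (hfresh : ∀ k ∈ m.map Prod.fst, k ∉ w ∧ k ∉ c ∧ k ∉ v) :
    (let t := m.foldl pvAStep (w, c, v)
     (((t.1.length : Int), (t.2.1.length : Int), (t.2.2.length : Int)) : Int × Int × Int)) =
      m.foldl pvBStep ((w.length : Int), (c.length : Int), (v.length : Int)) := by
  induction m generalizing w c v with
  | nil => simp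
  | cons p rest ih =>
    obtain ⟨d, bands⟩ := p
    simp only [List.map_cons, List.nodup_cons] at hnd
    have hd := hfresh d (by simp)
    have hdw := hd.1
    have hdc := hd.2.1
    have hdv := hd.2.2
    simp only [List.foldl_cons, pvAStep_eq]
    cases bands with
    | nil =>
      have hB : pvBStep ((w.length : Int), (c.length : Int), (v.length : Int)) (d, ([] : List (String × Int))) =
          ((w.length : Int), (c.length : Int), (v.length : Int)) := rfl
      rw [hB]
      simp only [List.isEmpty_nil, List.any_nil, Bool.false_eq_true, if_false, if_true]
      exact ih w c v hnd.2 (fun k hk => hfresh k (by simp [hk]))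
    | cons b bs =>
      have hB : pvBStep ((w.length : Int), (c.length : Int), (v.length : Int)) (d, b :: bs) =
          (((PySem.Set.add w d).length : Int),
           ((if (b :: bs).any (fun x => x.2 == 1 || x.2 == 3) then PySem.Set.add c d else c).length : Int),
           ((if (b :: bs).any (fun x => x.2 == 3) then PySem.Set.add v d else v).length : Int)) := by
        simp only [pvBStep, List.isEmpty_cons, Bool.false_eq_true, if_false,
          List.any_map, pv_mem_contains3, Function.comp_def, Prod.mk.injEq]
        refine ⟨?_, ?_, ?_⟩
        · rw [pv_len_add hdw]; push_cast; ring
        · split_ifs <;> first | rfl | (rw [pv_len_add hdc]; push_cast; ring)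
        · split_ifs <;> first | rfl | (rw [pv_len_add hdv]; push_cast; ring)
      rw [hB]
      have hne : ((b :: bs).isEmpty = true) = False := by simp
      simp only [List.isEmpty_cons, Bool.false_eq_true, if_false]
      refine ih _ _ _ hnd.2 ?_
      intro k hk
      have hk2 := hfresh k (by simp [hk])
      have hkd : k ≠ d := fun hEq => hnd.1 (hEq ▸ hk)
      refine ⟨?_, ?_, ?_⟩ <;>
        first
          | (split <;> simp [PySem.Set.mem_add, hk2.1, hk2.2.1, hk2.2.2, hkd])
          | simp [PySem.Set.mem_add, hk2.1, hk2.2.1, hk2.2.2, hkd]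

-- ===== VERDICT (by name: the statement is the Claim_ definition above) =====
theorem compute_dxcc_stats_spec : Claim_equal_compute_dxcc_stats := by
  intro matrix _ hpre
  unfold Spec_compute_dxcc_stats compute_dxcc_stats compute_dxcc_stats_alt
  have h := pv_main matrix PySem.Set.empty PySem.Set.empty PySem.Set.empty hpre
    (by intro k _; simp [PySem.Set.empty])
  simpa [PySem.Set.empty] using h
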